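-- pv_equiv track=rewrite | github.com/ESMCI/cime | CIME/baselines/performance.py | _parse_baseline
-- ===== SOURCE A (Python) =====
-- def _parse_baseline(data):
--     """
--     Parses default baseline format.
--
--     Default format:
--     sha: <commit sha> date: <date of bless> <value>
--
--     Parameters
--     ----------
--     data : str
--         Containing contents of baseline file.
--
--     Returns
--     -------
--     value : str
--         Value of the latest blessed baseline.
--     """
--     lines = data.split("\n")
--     lines = [x for x in lines if x != ""]
--
--     try:
--         value = lines[-1].strip().split(" ")[-1]
--     except IndexError:
--         value = None
--
--     return value
-- ===== SOURCE B (Python) =====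
-- def _parse_baseline(data):
--     for line in reversed(data.split("\n")):
--         if line != "":
--             return line.strip().split(" ")[-1]
--     return None
-- ===== Notes on version B (the rewrite author's own statement) =====
-- stated objective: simpler
-- what changed: Replaces the filtered-list construction plus negative indexing plus try/except with a single reverse scan that returns the last token of the first non-empty line it meets, or None if none exists.
import Mathlib
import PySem

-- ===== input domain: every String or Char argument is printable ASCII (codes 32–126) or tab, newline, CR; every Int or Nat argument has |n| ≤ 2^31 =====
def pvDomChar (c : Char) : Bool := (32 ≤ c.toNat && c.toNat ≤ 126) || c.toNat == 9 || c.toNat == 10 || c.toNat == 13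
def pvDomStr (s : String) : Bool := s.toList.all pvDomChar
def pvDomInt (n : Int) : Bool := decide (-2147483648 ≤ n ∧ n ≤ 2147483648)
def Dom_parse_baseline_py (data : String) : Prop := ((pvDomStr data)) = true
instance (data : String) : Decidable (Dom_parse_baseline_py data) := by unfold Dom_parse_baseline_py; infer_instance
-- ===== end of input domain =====

-- B changes the decomposition: a single reverse scan with early exit replaces A's filtered-list build plus negative indexing plus try/except (objective: simpler).

-- shared token extraction: both Pythons contain the identical expression line.strip().split(" ")[-1]
def pvLastTok (line : String) : Option String :=
  PySem.List.pyGet? ((PySem.Str.split? (PySem.Str.strip line) " ").getD []) (-1)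

-- ===== PORT A =====
def parse_baseline_py (data : String) : Option String :=
  let lines := (PySem.Str.split? data "\n").getD []   -- sep "\n" ≠ "", so split? is some
  let lines := lines.filter (fun x => x ≠ "")
  match PySem.List.pyGet? lines (-1) with
  | none => none                 -- IndexError branch: value = None
  | some last => pvLastTok last

-- ===== PORT B =====
def pvScanB : List String → Option String
  | [] => none
  | line :: rest => if line ≠ "" then pvLastTok line else pvScanB rest

def parse_baseline_py_alt (data : String) : Option String :=
  pvScanB ((PySem.Str.split? data "\n").getD []).reverse

-- ===== PRECONDITION & SPEC =====
def Spec_parse_baseline_py (data : String) (out : Option String) : Prop := out = parse_baseline_py_alt data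
instance (data : String) (out : Option String) : Decidable (Spec_parse_baseline_py data out) := by unfold Spec_parse_baseline_py; infer_instance

-- ===== CLAIM (what is proved, stated in full; the proofs are below) =====
def Claim_equal_parse_baseline_py : Prop := ∀ (data : String), Dom_parse_baseline_py data → Spec_parse_baseline_py data (parse_baseline_py data)

-- ===== LEMMAS AND PROOFS =====

-- B's reverse scan returns pvLastTok of the first non-empty element, i.e. of head? of the filter
theorem pvScanB_eq_filter_head (rs : List String) :
    pvScanB rs = (rs.filter (fun x => x ≠ "")).head?.bind pvLastTok := by
  induction rs with
  | nil => simp [pvScanB]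
  | cons l rest ih =>
    by_cases h : l = ""
    · simp [pvScanB, h, ih]
    · simp [pvScanB, h]

-- ===== VERDICT (by name: the statement is the Claim_ definition above) =====
theorem parse_baseline_py_spec : Claim_equal_parse_baseline_py := by
  intro data _
  unfold Spec_parse_baseline_py parse_baseline_py parse_baseline_py_alt
  rw [pvScanB_eq_filter_head, List.filter_reverse, List.head?_reverse]
  simp only [PySem.List.pyGet?_neg_one]
  cases h : (List.filter (fun x => decide (x ≠ "")) ((PySem.Str.split? data "\n").getD [])).getLast? <;>
    simp [h]
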